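-- pv_equiv track=rewrite | github.com/SmallYellowRubberDuck/Int_app | src/classification_model.py | find_violations_in_window
-- ===== SOURCE A (Python) =====
-- def find_violations_in_window(predictions, window_size=5):
--     """
--     Находит нарушения в окне заданного размера, исключая повторения
--     """
--     violations = []
--     used_times = set()
--
--     for t in range(len(predictions)):
--         pred_class = predictions[t]
--         if pred_class == 0:  # пропускаем класс "нет нарушения"
--             continue
--
--         # Проверяем, не находится ли текущее время в уже использованном окне
--         skip = False
--         for used_start, used_end in used_times:
--             if t >= used_start and t <= used_end:
--                 skip = True
--                 break
--         if skip:
--             continue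
--
--         violations.append((t, int(pred_class)))
--         # Добавляем временное окно в использованные
--         used_times.add((max(0, t - window_size // 2),
--                        min(len(predictions) - 1, t + window_size // 2)))
--
--     return violations
-- ===== SOURCE B (Python) =====
-- def find_violations_in_window(predictions, window_size=5):
--     violations = []
--     n = len(predictions)
--     half = window_size // 2
--     covered_until = -1  # every earlier window starts at or before its (earlier) index
--     for t, pred_class in enumerate(predictions):
--         if pred_class != 0 and t > covered_until:
--             violations.append((t, int(pred_class)))
--             covered_until = min(n - 1, t + half)
--     return violations
-- ===== Notes on version B (the rewrite author's own statement) =====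
-- stated objective: faster
-- what changed: Replaces the set of used windows and the inner scan over all of them by a single monotone covered_until index updated in one enumerate pass; window ends are nondecreasing and every window starts before the current index, so one end suffices.
import Mathlib
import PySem

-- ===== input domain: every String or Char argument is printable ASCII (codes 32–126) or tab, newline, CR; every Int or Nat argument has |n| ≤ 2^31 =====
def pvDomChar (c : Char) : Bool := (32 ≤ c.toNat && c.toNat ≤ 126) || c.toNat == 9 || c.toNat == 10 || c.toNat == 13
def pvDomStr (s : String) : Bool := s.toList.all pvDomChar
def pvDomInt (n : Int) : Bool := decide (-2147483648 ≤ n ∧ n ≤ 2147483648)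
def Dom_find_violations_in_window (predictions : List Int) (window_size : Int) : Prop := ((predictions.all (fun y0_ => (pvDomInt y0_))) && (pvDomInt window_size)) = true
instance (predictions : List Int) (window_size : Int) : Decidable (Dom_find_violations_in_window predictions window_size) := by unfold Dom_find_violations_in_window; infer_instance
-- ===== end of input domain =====

-- B replaces A's set of used windows and its inner scan by one monotone covered_until index (one pass): faster.


-- ===== PORT A =====
-- one iteration of A's loop at index tp.1 with value tp.2 = predictions[tp.1]:
-- skip class 0, scan all used windows (the for/break is List.any — the result is order-independent,
-- so iterating the Python set is exact), else append and add the clamped window to the set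
def fvStepA (n ws : Int) (st : List (Int × Int) × PySem.Set (Int × Int)) (tp : Int × Int) :
    List (Int × Int) × PySem.Set (Int × Int) :=
  if tp.2 = 0 then st
  else if st.2.any (fun se => decide (se.1 ≤ tp.1) && decide (tp.1 ≤ se.2)) then st
  else (st.1 ++ [(tp.1, tp.2)],
        PySem.Set.add st.2
          (max 0 (tp.1 - PySem.Int.floordiv ws 2),
           min (n - 1) (tp.1 + PySem.Int.floordiv ws 2)))

def find_violations_in_window (predictions : List Int) (window_size : Int) : List (Int × Int) :=
  ((PySem.List.pyRange 0 (PySem.List.len predictions) 1).foldl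
      (fun st t => fvStepA (PySem.List.len predictions) window_size st (t, PySem.List.pyGetD predictions t 0))
      ([], PySem.Set.empty)).1

-- ===== PORT B =====
-- one iteration of B's loop: act iff nonzero and past covered_until, update covered_until
def fvStepB (n half : Int) (st : List (Int × Int) × Int) (tp : Int × Int) :
    List (Int × Int) × Int :=
  if tp.2 ≠ 0 ∧ tp.1 > st.2 then (st.1 ++ [(tp.1, tp.2)], min (n - 1) (tp.1 + half)) else st

def find_violations_in_window_alt (predictions : List Int) (window_size : Int) : List (Int × Int) :=
  ((PySem.List.enumerate predictions 0).foldl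
      (fvStepB (PySem.List.len predictions) (PySem.Int.floordiv window_size 2))
      ([], -1)).1

-- ===== PRECONDITION & SPEC =====
def Spec_find_violations_in_window (predictions : List Int) (window_size : Int) (out : List (Int × Int)) : Prop := out = find_violations_in_window_alt predictions window_size
instance (predictions : List Int) (window_size : Int) (out : List (Int × Int)) : Decidable (Spec_find_violations_in_window predictions window_size out) := by unfold Spec_find_violations_in_window; infer_instance

-- ===== CLAIM (what is proved, stated in full; the proofs are below) =====
def Claim_equal_find_violations_in_window : Prop := ∀ (predictions : List Int) (window_size : Int), Dom_find_violations_in_window predictions window_size → Spec_find_violations_in_window predictions window_size (find_violations_in_window predictions window_size)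

-- ===== LEMMAS AND PROOFS =====

-- invariant relating A's set of used windows to B's covered_until at index s:
-- all windows start before s and end at or below cov; cov = -1 while the set is empty;
-- once nonempty, cov is the (latest, hence maximal) window end min (n-1) (t0+half), with its window in the set
def fvInv (n half s : Int) (u : List (Int × Int)) (cov : Int) : Prop :=
  (∀ se ∈ u, se.2 ≤ cov) ∧
  (u = [] → cov = -1) ∧
  (u ≠ [] → ∃ t0 : Int, 0 ≤ t0 ∧ t0 < s ∧ cov = min (n - 1) (t0 + half) ∧
      (max 0 (t0 - half), cov) ∈ u)

lemma fvInv_mono (n half s cov : Int) (u : List (Int × Int))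
    (h : fvInv n half s u cov) : fvInv n half (s + 1) u cov := by
  obtain ⟨h1, h2, h3⟩ := h
  refine ⟨h1, h2, fun hne => ?_⟩
  obtain ⟨t0, ht0⟩ := h3 hne
  exact ⟨t0, ht0.1, by omega, ht0.2.2⟩

-- A's inner scan succeeds exactly when s ≤ cov (for 0 ≤ s, under the invariant)
lemma fvSkip_iff (n half s cov : Int) (u : List (Int × Int))
    (hs : 0 ≤ s) (h : fvInv n half s u cov) :
    (u.any (fun se => decide (se.1 ≤ s) && decide (s ≤ se.2))) = true ↔ s ≤ cov := by
  obtain ⟨h1, h2, h3⟩ := h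
  constructor
  · intro hany
    obtain ⟨se, hmem, hcond⟩ := List.any_eq_true.mp hany
    simp only [Bool.and_eq_true, decide_eq_true_eq] at hcond
    have := h1 se hmem
    omega
  · intro hle
    have hne : u ≠ [] := by
      intro he; have := h2 he; omega
    obtain ⟨t0, ht00, ht0s, hcov, hmem⟩ := h3 hne
    refine List.any_eq_true.mpr ⟨_, hmem, ?_⟩
    simp only [Bool.and_eq_true, decide_eq_true_eq]
    constructor
    · -- max 0 (t0 - half) ≤ s : s ≤ cov ≤ t0 + half forces half > 0 since t0 < s
      omega
    · omega

lemma fvLoop_eq (n ws : Int) (ps : List Int) :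
    ∀ (s cov : Int) (acc : List (Int × Int)) (u : PySem.Set (Int × Int)),
    0 ≤ s → fvInv n (PySem.Int.floordiv ws 2) s u cov →
    ((PySem.List.enumerate ps s).foldl (fvStepA n ws) (acc, u)).1
      = ((PySem.List.enumerate ps s).foldl (fvStepB n (PySem.Int.floordiv ws 2)) (acc, cov)).1 := by
  induction ps with
  | nil => intro s cov acc u _ _; simp [PySem.List.enumerate_nil]
  | cons p ps ih =>
    intro s cov acc u hs hinv
    simp only [PySem.List.enumerate_cons, List.foldl_cons]
    by_cases hp : p = 0
    · rw [show fvStepA n ws (acc, u) (s, p) = (acc, u) by simp [fvStepA, hp],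
         show fvStepB n (PySem.Int.floordiv ws 2) (acc, cov) (s, p) = (acc, cov) by
           simp [fvStepB, hp]]
      exact ih (s + 1) cov acc u (by omega) (fvInv_mono _ _ _ _ _ hinv)
    · by_cases hc : s ≤ cov
      · -- A skips (the scan finds a covering window), B skips (s ≤ covered_until)
        have hskip := (fvSkip_iff n (PySem.Int.floordiv ws 2) s cov u hs hinv).mpr hc
        rw [show fvStepA n ws (acc, u) (s, p) = (acc, u) by simp [fvStepA, hp, hskip],
           show fvStepB n (PySem.Int.floordiv ws 2) (acc, cov) (s, p) = (acc, cov) by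
             simp only [fvStepB]; rw [if_neg]; rintro ⟨-, h⟩; omega]
        exact ih (s + 1) cov acc u (by omega) (fvInv_mono _ _ _ _ _ hinv)
      · -- both act, with the same appended pair
        have hskip : (u.any (fun se => decide (se.1 ≤ s) && decide (s ≤ se.2))) = false := by
          by_contra hne
          have := (fvSkip_iff n (PySem.Int.floordiv ws 2) s cov u hs hinv).mp
            (by revert hne; cases u.any (fun se => decide (se.1 ≤ s) && decide (s ≤ se.2)) <;> simp)
          omega
        rw [show fvStepA n ws (acc, u) (s, p)
              = (acc ++ [(s, p)], u.add (max 0 (s - PySem.Int.floordiv ws 2),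
                  min (n - 1) (s + PySem.Int.floordiv ws 2))) by simp [fvStepA, hp, hskip],
           show fvStepB n (PySem.Int.floordiv ws 2) (acc, cov) (s, p)
              = (acc ++ [(s, p)], min (n - 1) (s + PySem.Int.floordiv ws 2)) by
             simp only [fvStepB]; rw [if_pos ⟨hp, by omega⟩]]
        apply ih (s + 1) _ _ _ (by omega)
        -- the invariant after adding the window of s: the new end is the new covered_until,
        -- and it dominates the old one because window ends are monotone in the index
        obtain ⟨h1, h2, h3⟩ := hinv
        set half := PySem.Int.floordiv ws 2 with hhalf
        set w : Int × Int := (max 0 (s - half), min (n - 1) (s + half)) with hw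
        refine ⟨fun se hse => ?_, fun he => ?_, fun _ => ?_⟩
        · rcases (PySem.Set.mem_add u w se).mp hse with h | h
          · have h4 := h1 se h
            have hu : u ≠ [] := by intro he; rw [he] at h; exact absurd h (List.not_mem_nil)
            obtain ⟨t0, ht00, ht0s, hcov, _⟩ := h3 hu
            omega
          · rw [h, hw]
        · have hm := (PySem.Set.mem_add u w w).mpr (Or.inr rfl)
          rw [he] at hm; exact absurd hm (List.not_mem_nil)
        · exact ⟨s, hs, by omega, rfl, (PySem.Set.mem_add u w w).mpr (Or.inr rfl)⟩

-- ===== VERDICT (by name: the statement is the Claim_ definition above) =====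
theorem find_violations_in_window_spec : Claim_equal_find_violations_in_window := by
  intro predictions window_size _
  unfold Spec_find_violations_in_window find_violations_in_window find_violations_in_window_alt
  have hfold : (PySem.List.enumerate predictions).foldl
        (fvStepA (PySem.List.len predictions) window_size) (([], PySem.Set.empty) :
          List (Int × Int) × PySem.Set (Int × Int))
      = (PySem.List.pyRange 0 (PySem.List.len predictions) 1).foldl
        (fun st t => fvStepA (PySem.List.len predictions) window_size st
          (t, PySem.List.pyGetD predictions t 0)) ([], PySem.Set.empty) := by
    rw [PySem.List.enumerate_eq_map_pyRange predictions 0, List.foldl_map]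
  rw [← hfold]
  exact fvLoop_eq (PySem.List.len predictions) window_size predictions 0 (-1) [] PySem.Set.empty
    le_rfl ⟨by simp [PySem.Set.empty], fun _ => rfl, fun h => absurd rfl h⟩
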